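-- pv_equiv track=rewrite | github.com/EstebanIbarra/gb_decompiler | arm_opcode_parser.py | split_operands
-- ===== SOURCE A (Python) =====
-- def split_operands(tail: str):
--     tokens = []
--     curr = []
--     depth = 0
--     for ch in tail:
--         if ch == " " and depth == 0:
--             if curr:
--                 tokens.append("".join(curr))
--                 curr = []
--         else:
--             curr.append(ch)
--             if ch == "{":
--                 depth += 1
--             elif ch == "}":
--                 depth = max(depth - 1, 0)
--     if curr:
--         tokens.append("".join(curr))
--     return tokens
-- ===== SOURCE B (Python) =====
-- def split_operands(tail: str):
--     # find the split positions (depth-0 spaces) in one pass, then slice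
--     depth = 0
--     cuts = []
--     for i, ch in enumerate(tail):
--         if ch == "{":
--             depth += 1
--         elif ch == "}":
--             depth = max(depth - 1, 0)
--         elif ch == " " and depth == 0:
--             cuts.append(i)
--     tokens = []
--     prev = 0
--     for idx in cuts + [len(tail)]:
--         seg = tail[prev:idx]
--         if seg:
--             tokens.append(seg)
--         prev = idx + 1
--     return tokens
-- ===== Notes on version B (the rewrite author's own statement) =====
-- stated objective: alternative
-- what changed: Replaces A's char-buffer accumulation with a two-phase strategy: a first pass records the indices of depth-0 spaces, a second pass slices the string between consecutive cut indices and keeps the non-empty segments.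
import Mathlib
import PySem

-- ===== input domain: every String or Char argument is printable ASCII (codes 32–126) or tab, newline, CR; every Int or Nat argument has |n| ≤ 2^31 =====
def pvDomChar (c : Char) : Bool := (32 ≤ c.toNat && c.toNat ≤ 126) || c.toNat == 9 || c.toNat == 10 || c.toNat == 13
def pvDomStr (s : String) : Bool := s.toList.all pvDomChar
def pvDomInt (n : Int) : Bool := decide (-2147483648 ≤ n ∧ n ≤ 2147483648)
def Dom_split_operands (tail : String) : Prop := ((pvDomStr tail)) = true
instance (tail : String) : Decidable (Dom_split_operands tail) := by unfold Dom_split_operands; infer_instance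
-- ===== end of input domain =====

-- B replaces A's char-buffer accumulation with a two-phase cut-index-then-slice decomposition; same result, same cost (alternative decomposition).

-- ===== PORT A =====
def aStep (st : List String × List Char × Int) (ch : Char) : List String × List Char × Int :=
  let tokens := st.1; let curr := st.2.1; let depth := st.2.2
  if ch = ' ' ∧ depth = 0 then
    if curr ≠ [] then (tokens ++ [String.ofList curr], [], depth) else (tokens, curr, depth)
  else
    let curr' := curr ++ [ch]
    if ch = '{' then (tokens, curr', depth + 1)
    else if ch = '}' then (tokens, curr', max (depth - 1) 0)
    else (tokens, curr', depth)

def split_operands (tail : String) : List String :=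
  let st := tail.toList.foldl aStep ([], [], 0)
  if st.2.1 ≠ [] then st.1 ++ [String.ofList st.2.1] else st.1

-- ===== PORT B =====
def bScanStep (st : Int × List Int) (p : Int × Char) : Int × List Int :=
  let depth := st.1; let cuts := st.2; let i := p.1; let ch := p.2
  if ch = '{' then (depth + 1, cuts)
  else if ch = '}' then (max (depth - 1) 0, cuts)
  else if ch = ' ' ∧ depth = 0 then (depth, cuts ++ [i])
  else (depth, cuts)

def bEmit (full : List Char) (st : List String × Int) (idx : Int) : List String × Int :=
  let seg := PySem.List.slice full (some st.2) (some idx)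
  (if seg ≠ [] then st.1 ++ [String.ofList seg] else st.1, idx + 1)

def split_operands_alt (tail : String) : List String :=
  let l := tail.toList
  let cuts := ((PySem.List.enumerate l 0).foldl bScanStep (0, [])).2
  ((cuts ++ [(l.length : Int)]).foldl (bEmit l) ([], 0)).1

-- ===== PRECONDITION & SPEC =====
def Spec_split_operands (tail : String) (out : List String) : Prop := out = split_operands_alt tail
instance (tail : String) (out : List String) : Decidable (Spec_split_operands tail out) := by unfold Spec_split_operands; infer_instance

-- ===== CLAIM (what is proved, stated in full; the proofs are below) =====
def Claim_equal_split_operands : Prop := ∀ (tail : String), Dom_split_operands tail → Spec_split_operands tail (split_operands tail)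

-- ===== LEMMAS AND PROOFS =====

/-- depth transition common to both programs for a non-cut character. -/
def stepDepth (depth : Int) (ch : Char) : Int :=
  if ch = '{' then depth + 1 else if ch = '}' then max (depth - 1) 0 else depth

/-- reference splitter: split at depth-0 spaces, drop empty pieces. -/
def splitRec : List Char → Int → List Char → List String
  | [], _, curr => if curr ≠ [] then [String.ofList curr] else []
  | ch :: rest, depth, curr =>
    if ch = ' ' ∧ depth = 0 then
      (if curr ≠ [] then [String.ofList curr] else []) ++ splitRec rest depth []
    else splitRec rest (stepDepth depth ch) (curr ++ [ch])

/-- positions of depth-0 spaces, counting from i. -/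
def cutsFrom : List Char → Int → Int → List Int
  | [], _, _ => []
  | ch :: rest, i, depth =>
    if ch = ' ' ∧ depth = 0 then i :: cutsFrom rest (i + 1) depth
    else cutsFrom rest (i + 1) (stepDepth depth ch)

theorem a_fold (l : List Char) : ∀ (tokens : List String) (curr : List Char) (depth : Int),
    (let st := l.foldl aStep (tokens, curr, depth);
     if st.2.1 ≠ [] then st.1 ++ [String.ofList st.2.1] else st.1) = tokens ++ splitRec l depth curr := by
  induction l with
  | nil =>
    intro tokens curr depth
    by_cases hc : curr = [] <;> simp [splitRec, hc]
  | cons ch rest ih =>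
    intro tokens curr depth
    simp only [List.foldl_cons, splitRec, aStep]
    by_cases hsp : ch = ' ' ∧ depth = 0
    · simp only [if_pos hsp]
      by_cases hc : curr = []
      · simp [hc, ih]
      · simp [hc, ih, List.append_assoc]
    · simp only [if_neg hsp, stepDepth]
      by_cases h1 : ch = '{'
      · simp [h1, ih]
      · by_cases h2 : ch = '}' <;> simp [h1, h2, ih]

theorem b_scan (l : List Char) : ∀ (s depth : Int) (acc : List Int),
    ((PySem.List.enumerate l s).foldl bScanStep (depth, acc)).2 = acc ++ cutsFrom l s depth := by
  induction l with
  | nil => intro s depth acc; simp [PySem.List.enumerate_nil, cutsFrom]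
  | cons ch rest ih =>
    intro s depth acc
    rw [PySem.List.enumerate_cons]
    simp only [List.foldl_cons, bScanStep, cutsFrom, stepDepth]
    by_cases h1 : ch = '{'
    · simp [h1, ih]
    · by_cases h2 : ch = '}'
      · simp [h2, ih]
      · by_cases hsp : ch = ' ' ∧ depth = 0
        · simp [hsp, ih]
        · simp [h1, h2, hsp, ih]

theorem b_emit (l : List Char) : ∀ (full : List Char) (i0 prev : Nat) (acc : List String) (depth : Int),
    prev ≤ i0 → i0 ≤ full.length → full.drop i0 = l →
    ((cutsFrom l (i0 : Int) depth ++ [(full.length : Int)]).foldl (bEmit full) (acc, (prev : Int))).1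
      = acc ++ splitRec l depth ((full.drop prev).take (i0 - prev)) := by
  induction l with
  | nil =>
    intro full i0 prev acc depth hpi hil hdrop
    have hlen : i0 = full.length := by
      have := congrArg List.length hdrop; simp at this; omega
    subst hlen
    simp only [cutsFrom, List.nil_append, List.foldl_cons, List.foldl_nil, bEmit, splitRec]
    rw [PySem.List.slice_natCast]
    split_ifs <;> simp_all
  | cons ch rest ih =>
    intro full i0 prev acc depth hpi hil hdrop
    have hi0 : i0 < full.length := by
      have := congrArg List.length hdrop; simp at this; omega
    have hch : full[i0]? = some ch := by
      have : (full.drop i0)[0]? = some ch := by rw [hdrop]; rfl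
      simpa [List.getElem?_drop] using this
    have hdrop' : full.drop (i0 + 1) = rest := by
      have := congrArg List.tail hdrop
      simpa [List.tail_drop] using this
    simp only [cutsFrom, splitRec]
    by_cases hsp : ch = ' ' ∧ depth = 0
    · simp only [if_pos hsp, List.cons_append, List.foldl_cons, bEmit]
      rw [PySem.List.slice_natCast]
      have hcast : ((i0 : Int) + 1) = ((i0 + 1 : Nat) : Int) := by push_cast; ring
      rw [hcast, ih full (i0 + 1) (i0 + 1) _ depth (le_refl _) (by omega) hdrop']
      by_cases hc : (full.drop prev).take (i0 - prev) = [] <;>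
        simp [hc, List.append_assoc]
    · simp only [if_neg hsp]
      have hcast : ((i0 : Int) + 1) = ((i0 + 1 : Nat) : Int) := by push_cast; ring
      rw [hcast, ih full (i0 + 1) prev acc (stepDepth depth ch) (by omega) (by omega) hdrop']
      have htake : (full.drop prev).take (i0 + 1 - prev) = (full.drop prev).take (i0 - prev) ++ [ch] := by
        have h1 : i0 + 1 - prev = (i0 - prev) + 1 := by omega
        rw [h1, List.take_add_one]
        have : (full.drop prev)[i0 - prev]? = some ch := by
          rw [List.getElem?_drop]
          have : prev + (i0 - prev) = i0 := by omega
          rw [this, hch]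
        simp [this]
      rw [htake]

-- ===== VERDICT (by name: the statement is the Claim_ definition above) =====
theorem split_operands_spec : Claim_equal_split_operands := by
  intro tail _
  show split_operands tail = split_operands_alt tail
  simp only [split_operands, split_operands_alt]
  rw [a_fold, b_scan]
  have h := b_emit tail.toList tail.toList 0 0 [] 0 (le_refl _) (by omega) (by simp)
  simpa using h.symm
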